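-- pv_equiv track=rewrite | github.com/lastz/lastz | tools/fasta_softmask_intervals.py | complement_intervals
-- ===== SOURCE A (Python) =====
-- def complement_intervals(intervals,seqLen):
-- 	prevEnd = 0
-- 	for (start,end) in intervals:
-- 		if (start != prevEnd):
-- 			yield (prevEnd,start)
-- 		prevEnd = end
-- 	if (seqLen != prevEnd):
-- 		yield (prevEnd,seqLen)
-- ===== SOURCE B (Python) =====
-- def complement_intervals(intervals, seqLen):
--     # Back-to-front: walk the intervals in reverse carrying the next start,
--     # collect gaps right-to-left, then emit them reversed.
--     rev = []
--     nxt = seqLen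
--     for (start, end) in reversed(intervals):
--         if end != nxt:
--             rev.append((end, nxt))
--         nxt = start
--     if nxt != 0:
--         rev.append((0, nxt))
--     yield from reversed(rev)
-- ===== Notes on version B (the rewrite author's own statement) =====
-- stated objective: alternative
-- what changed: Replaces the forward pass carrying prevEnd (comparing each start against the previous end) with a backward traversal carrying the next start (comparing each end against it), collecting the gaps right-to-left and emitting the collected list reversed.
import Mathlib
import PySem

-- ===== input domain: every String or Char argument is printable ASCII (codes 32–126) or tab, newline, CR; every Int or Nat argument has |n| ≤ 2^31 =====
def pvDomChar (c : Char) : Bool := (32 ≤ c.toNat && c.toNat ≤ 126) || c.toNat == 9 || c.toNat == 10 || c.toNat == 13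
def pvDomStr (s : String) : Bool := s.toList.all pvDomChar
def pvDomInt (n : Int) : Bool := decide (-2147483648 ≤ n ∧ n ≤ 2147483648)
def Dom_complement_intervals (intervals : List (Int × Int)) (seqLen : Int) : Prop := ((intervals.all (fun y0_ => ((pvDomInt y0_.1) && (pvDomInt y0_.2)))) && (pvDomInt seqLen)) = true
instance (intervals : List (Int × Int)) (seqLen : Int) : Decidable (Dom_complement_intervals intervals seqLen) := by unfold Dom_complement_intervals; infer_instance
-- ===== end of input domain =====

-- B traverses the intervals BACKWARDS carrying the next start, collecting the gaps
-- right-to-left and reversing at the end; same output, different decomposition ("alternative").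

-- ===== PORT A =====
-- the Python for-loop over intervals with running prevEnd, then the trailing yield
def complement_intervals_loop (seqLen : Int) (prevEnd : Int) : List (Int × Int) → List (Int × Int)
  | [] => if seqLen ≠ prevEnd then [(prevEnd, seqLen)] else []
  | (start, «end») :: rest =>
      (if start ≠ prevEnd then [(prevEnd, start)] else []) ++
        complement_intervals_loop seqLen «end» rest

def complement_intervals (intervals : List (Int × Int)) (seqLen : Int) : List (Int × Int) :=
  complement_intervals_loop seqLen 0 intervals

-- ===== PORT B =====
-- fold over reversed(intervals) carrying (collected-gaps, next-start), then the
-- leading-gap check, then reversed(rev)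
def complement_intervals_alt (intervals : List (Int × Int)) (seqLen : Int) : List (Int × Int) :=
  let st := intervals.reverse.foldl
    (fun (acc : List (Int × Int) × Int) iv =>
      (if iv.2 ≠ acc.2 then acc.1 ++ [(iv.2, acc.2)] else acc.1, iv.1))
    ([], seqLen)
  (if st.2 ≠ 0 then st.1 ++ [(0, st.2)] else st.1).reverse

-- ===== PRECONDITION & SPEC =====
def Spec_complement_intervals (intervals : List (Int × Int)) (seqLen : Int) (out : List (Int × Int)) : Prop := out = complement_intervals_alt intervals seqLen
instance (intervals : List (Int × Int)) (seqLen : Int) (out : List (Int × Int)) : Decidable (Spec_complement_intervals intervals seqLen out) := by unfold Spec_complement_intervals; infer_instance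

-- ===== CLAIM =====
def Claim_equal_complement_intervals : Prop := ∀ (intervals : List (Int × Int)) (seqLen : Int), Dom_complement_intervals intervals seqLen → Spec_complement_intervals intervals seqLen (complement_intervals intervals seqLen)

-- ===== LEMMAS AND PROOFS =====

-- gaps collected (in processing = right-to-left order) by B's loop body over ys
def pvG : List (Int × Int) → Int → List (Int × Int)
  | [], _ => []
  | (s, e) :: ys, n => (if e ≠ n then [(e, n)] else []) ++ pvG ys s

-- the carry (next start) after B's loop over ys
def pvN : List (Int × Int) → Int → Int
  | [], n => n
  | (s, _) :: ys, _ => pvN ys s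

-- first start of xs, else the default
def pvH : List (Int × Int) → Int → Int
  | [], n => n
  | (s, _) :: _, _ => s

theorem pvFold_eq (ys : List (Int × Int)) : ∀ (rev0 : List (Int × Int)) (n : Int),
    ys.foldl (fun (acc : List (Int × Int) × Int) iv =>
        (if iv.2 ≠ acc.2 then acc.1 ++ [(iv.2, acc.2)] else acc.1, iv.1)) (rev0, n)
      = (rev0 ++ pvG ys n, pvN ys n) := by
  induction ys with
  | nil => intro rev0 n; simp [pvG, pvN]
  | cons hd tl ih =>
      intro rev0 n
      obtain ⟨s, e⟩ := hd
      simp only [List.foldl_cons]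
      by_cases h : e = n
      · simpa [pvG, pvN, h] using ih rev0 s
      · simpa [pvG, pvN, h] using ih (rev0 ++ [(e, n)]) s

theorem pvG_append (ys : List (Int × Int)) (s e : Int) : ∀ n : Int,
    pvG (ys ++ [(s, e)]) n = pvG ys n ++ (if e ≠ pvN ys n then [(e, pvN ys n)] else []) := by
  induction ys with
  | nil => intro n; simp [pvG, pvN]
  | cons hd tl ih =>
      intro n
      obtain ⟨s', e'⟩ := hd
      simp [pvG, pvN, ih]

theorem pvN_append (ys : List (Int × Int)) (s e : Int) : ∀ n : Int,
    pvN (ys ++ [(s, e)]) n = s := by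
  induction ys with
  | nil => intro n; simp [pvN]
  | cons hd tl ih =>
      intro n
      obtain ⟨s', e'⟩ := hd
      simp [pvN, ih]

theorem pvN_reverse (xs : List (Int × Int)) (L : Int) : pvN xs.reverse L = pvH xs L := by
  cases xs with
  | nil => simp [pvN, pvH]
  | cons hd tl =>
      obtain ⟨s, e⟩ := hd
      simp [List.reverse_cons, pvN_append, pvH]

@[simp] theorem pvH_nil (n : Int) : pvH [] n = n := rfl

@[simp] theorem pvH_cons (s e : Int) (tl : List (Int × Int)) (n : Int) :
    pvH ((s, e) :: tl) n = s := rfl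

theorem pvLoop_eq (L : Int) (xs : List (Int × Int)) : ∀ p : Int,
    complement_intervals_loop L p xs
      = (if pvH xs L ≠ p then [(p, pvH xs L)] else []) ++ (pvG xs.reverse L).reverse := by
  induction xs with
  | nil => intro p; simp [complement_intervals_loop, pvG, eq_comm]
  | cons hd tl ih =>
      intro p
      obtain ⟨s, e⟩ := hd
      simp only [complement_intervals_loop, ih e, List.reverse_cons, pvG_append,
        pvN_reverse, pvH_cons, List.reverse_append]
      by_cases h : e = pvH tl L <;> simp [h, eq_comm]

-- ===== VERDICT =====
theorem complement_intervals_spec : Claim_equal_complement_intervals := by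
  intro intervals seqLen _
  unfold Spec_complement_intervals complement_intervals complement_intervals_alt
  rw [pvFold_eq]
  simp only [pvN_reverse]
  by_cases h : pvH intervals seqLen = 0 <;>
    simp [pvLoop_eq, h]
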